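-- pv_equiv track=rewrite | github.com/nobilauto-it/CRM | app.py | unique_column_name
-- ===== SOURCE A (Python) =====
-- def unique_column_name(existing: set, base: str) -> str:
--     if base not in existing:
--         existing.add(base)
--         return base
--     i = 2
--     while f"{base}_{i}" in existing:
--         i += 1
--     col = f"{base}_{i}"
--     existing.add(col)
--     return col
-- ===== SOURCE B (Python) =====
-- def unique_column_name(existing: set, base: str) -> str:
--     # Different strategy: instead of probing formatted candidates against the whole set
--     # one by one, build an index of the suffixes already used for this base in ONE pass,
--     # then pick the smallest free integer from a bounded range (pigeonhole: among the
--     # len(taken)+1 integers 2..len(taken)+2 one suffix must be free).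
--     if base not in existing:
--         existing.add(base)
--         return base
--     prefix = base + "_"
--     taken = {name[len(prefix):] for name in existing if name.startswith(prefix)}
--     i = min(c for c in range(2, len(taken) + 3) if str(c) not in taken)
--     col = prefix + str(i)
--     existing.add(col)
--     return col
-- ===== Notes on version B (the rewrite author's own statement) =====
-- stated objective: alternative
-- what changed: A probes formatted candidates base_2, base_3, ... against the whole set until one is free; B instead builds an index of the suffixes already used for this base in one pass over the set and then takes the minimum free integer from the bounded range 2..len(taken)+2 (pigeonhole guarantees a free one there).
import Mathlib
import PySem

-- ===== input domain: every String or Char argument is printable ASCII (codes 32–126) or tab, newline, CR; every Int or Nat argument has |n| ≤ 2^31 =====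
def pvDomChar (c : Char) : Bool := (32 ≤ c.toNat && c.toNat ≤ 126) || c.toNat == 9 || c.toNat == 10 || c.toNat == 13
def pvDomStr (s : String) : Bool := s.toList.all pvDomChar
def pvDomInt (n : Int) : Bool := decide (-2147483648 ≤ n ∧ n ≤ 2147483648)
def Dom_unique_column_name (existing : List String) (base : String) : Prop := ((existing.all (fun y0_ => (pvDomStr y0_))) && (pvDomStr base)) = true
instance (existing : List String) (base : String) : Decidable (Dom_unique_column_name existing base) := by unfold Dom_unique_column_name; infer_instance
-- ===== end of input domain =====

-- B replaces A's probe-until-free loop (formatted candidate vs whole set, per probe) by one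
-- indexing pass collecting the suffixes already used for this base, then the minimum free
-- integer from a bounded range; same observable behaviour. Both Pythons add the returned
-- name to the `existing` set in place; the equivalence proved here is about the return value.


-- ===== PORT A =====
-- f"{base}_{i}"
def pvFcol (base : String) (i : Int) : String := base ++ "_" ++ PySem.Int.toStr i

-- the `while f"{base}_{i}" in existing: i += 1` loop; the fuel `existing.length + 1`
-- always suffices (proved below: pvExistsFree), it only makes the loop total
def pvALoop (existing : List String) (base : String) : Int → Nat → Int
  | i, 0 => i
  | i, fuel + 1 =>
    if pvFcol base i ∈ existing then pvALoop existing base (i + 1) fuel else i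

def unique_column_name (existing : List String) (base : String) : String :=
  if base ∉ existing then base
  else pvFcol base (pvALoop existing base 2 (existing.length + 1))

-- ===== PORT B =====
-- one pass over the set collects the suffix index; then the least free integer is taken
-- from the bounded range 2 .. len(taken)+2 (Python's min over the generator; an empty
-- generator would be Python's ValueError — proved unreachable below, the getD 0 is dead)
def unique_column_name_alt (existing : List String) (base : String) : String :=
  if base ∉ existing then base
  else
    let pre := base ++ "_"
    let taken : PySem.Set String :=
      PySem.Set.ofList ((existing.filter (fun name => PySem.Str.startswith name pre)).map
        (fun name => PySem.Str.slice name (some (PySem.Str.len pre)) none))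
    let i := (PySem.List.min?
        ((PySem.List.pyRange 2 ((taken.length : Int) + 3) 1).filter
          (fun c => !(PySem.Set.contains taken (PySem.Int.toStr c)))) (fun c => c)).getD 0
    pre ++ PySem.Int.toStr i

-- ===== PRECONDITION & SPEC =====
def Spec_unique_column_name (existing : List String) (base : String) (out : String) : Prop := out = unique_column_name_alt existing base
instance (existing : List String) (base : String) (out : String) : Decidable (Spec_unique_column_name existing base out) := by unfold Spec_unique_column_name; infer_instance

-- ===== CLAIM (what is proved, stated in full; the proofs are below) =====
def Claim_equal_unique_column_name : Prop := ∀ (existing : List String) (base : String), Dom_unique_column_name existing base → Spec_unique_column_name existing base (unique_column_name existing base)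

-- ===== LEMMAS AND PROOFS =====

-- decimal value of a digit string, used to invert Nat.toDigits
def pvDecode (l : List Char) : Nat := l.foldl (fun a c => a * 10 + (c.toNat - 48)) 0

theorem pvDigitChar_val (d : Nat) (h : d < 10) : (Nat.digitChar d).toNat = 48 + d := by
  interval_cases d <;> decide

theorem pvToDigitsCore_append (b : Nat) :
    ∀ (fuel n : Nat) (rest : List Char),
      Nat.toDigitsCore b fuel n rest = Nat.toDigitsCore b fuel n [] ++ rest := by
  intro fuel
  induction fuel with
  | zero => intro n rest; simp [Nat.toDigitsCore]
  | succ fuel ih =>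
    intro n rest
    simp only [Nat.toDigitsCore]
    by_cases h : n / b = 0
    · simp [h]
    · simp only [h, if_false]
      rw [ih (n / b) (Nat.digitChar (n % b) :: rest), ih (n / b) [Nat.digitChar (n % b)]]
      simp

theorem pvDecode_append (l : List Char) (c : Char) :
    pvDecode (l ++ [c]) = pvDecode l * 10 + (c.toNat - 48) := by
  simp [pvDecode, List.foldl_append]

theorem pvDecode_toDigitsCore :
    ∀ (fuel n : Nat), n < 10 ^ fuel → pvDecode (Nat.toDigitsCore 10 fuel n []) = n := by
  intro fuel
  induction fuel with
  | zero =>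
    intro n hn
    have : n = 0 := by simpa using hn
    subst this
    simp [Nat.toDigitsCore, pvDecode]
  | succ fuel ih =>
    intro n hn
    simp only [Nat.toDigitsCore]
    by_cases h : n / 10 = 0
    · have hlt : n < 10 := by omega
      simp [h, pvDecode, pvDigitChar_val (n % 10) (Nat.mod_lt n (by norm_num))]
      omega
    · simp only [h, if_false]
      rw [pvToDigitsCore_append 10 fuel (n / 10) [Nat.digitChar (n % 10)], pvDecode_append]
      have hdiv : n / 10 < 10 ^ fuel := by
        rw [pow_succ] at hn
        exact Nat.div_lt_of_lt_mul (by omega)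
      rw [ih (n / 10) hdiv, pvDigitChar_val (n % 10) (Nat.mod_lt n (by omega))]
      omega

theorem pvToDigits_inj {m n : Nat} (h : Nat.toDigits 10 m = Nat.toDigits 10 n) : m = n := by
  have hm : m < 10 ^ (m + 1) :=
    lt_of_lt_of_le (Nat.lt_pow_self (by norm_num)) (Nat.pow_le_pow_right (by norm_num) (by omega))
  have hn : n < 10 ^ (n + 1) :=
    lt_of_lt_of_le (Nat.lt_pow_self (by norm_num)) (Nat.pow_le_pow_right (by norm_num) (by omega))
  have h1 : pvDecode (Nat.toDigits 10 m) = m := pvDecode_toDigitsCore (m + 1) m hm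
  have h2 : pvDecode (Nat.toDigits 10 n) = n := pvDecode_toDigitsCore (n + 1) n hn
  rw [h, h2] at h1
  omega

theorem pvToStr_inj {i j : Int} (hi : 0 ≤ i) (hj : 0 ≤ j)
    (h : PySem.Int.toStr i = PySem.Int.toStr j) : i = j := by
  have hl : (PySem.Int.toStr i).toList = (PySem.Int.toStr j).toList := by rw [h]
  simp only [PySem.Int.toList_toStr] at hl
  simp only [PySem.Int.toChars, if_neg (by omega : ¬ i < 0), if_neg (by omega : ¬ j < 0)] at hl
  have := pvToDigits_inj hl
  omega

theorem pvFcol_inj (base : String) {i j : Int} (hi : 0 ≤ i) (hj : 0 ≤ j)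
    (h : pvFcol base i = pvFcol base j) : i = j := by
  have hl : (pvFcol base i).toList = (pvFcol base j).toList := by rw [h]
  simp only [pvFcol, String.toList_append, List.append_cancel_left_eq] at hl
  exact pvToStr_inj hi hj (String.toList_inj.mp (by simpa [PySem.Int.toList_toStr] using hl))

-- proof-side names for B's intermediate values (the port builds them in `let`s)
def pvTk (existing : List String) (base : String) : PySem.Set String :=
  PySem.Set.ofList ((existing.filter (fun name => PySem.Str.startswith name (base ++ "_"))).map
    (fun name => PySem.Str.slice name (some (PySem.Str.len (base ++ "_"))) none))

def pvFree (existing : List String) (base : String) : List Int :=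
  (PySem.List.pyRange 2 (((pvTk existing base).length : Int) + 3) 1).filter
    (fun c => !(PySem.Set.contains (pvTk existing base) (PySem.Int.toStr c)))

theorem pvAlt_eq (existing : List String) (base : String) (h : base ∈ existing) :
    unique_column_name_alt existing base
      = pvFcol base ((PySem.List.min? (pvFree existing base) (fun c => c)).getD 0) := by
  simp only [unique_column_name_alt, pvFree, pvTk, pvFcol, if_neg (not_not_intro h),
    String.append_assoc]

-- a slice after a positive startswith test peels the literal prefix off
theorem pvSlice_drop (name p : String) :
    (PySem.Str.slice name (some (PySem.Str.len p)) none).toList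
      = name.toList.drop p.toList.length := by
  rw [PySem.Str.toList_slice, PySem.Str.len_eq, PySem.Chars.slice_eq_listSlice,
    PySem.List.slice_from_natCast]

-- str(i) is a used suffix exactly when f"{base}_{i}" is an existing column
theorem pvMem_tk (existing : List String) (base : String) (i : Int) :
    PySem.Int.toStr i ∈ pvTk existing base ↔ pvFcol base i ∈ existing := by
  unfold pvTk
  rw [PySem.Set.mem_ofList]
  simp only [List.mem_map, List.mem_filter]
  constructor
  · rintro ⟨name, ⟨hmem, hsw⟩, hsl⟩
    rw [PySem.Str.startswith_eq, PySem.Chars.startswith_iff] at hsw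
    obtain ⟨t, ht⟩ := hsw
    have hts : (PySem.Int.toStr i).toList = t := by
      rw [← hsl, pvSlice_drop, ← ht, List.drop_left]
    have hname : name = pvFcol base i := by
      apply String.toList_inj.mp
      simp only [pvFcol, String.toList_append, ← ht, hts, String.toList_append]
    rwa [hname] at hmem
  · intro hmem
    refine ⟨pvFcol base i, ⟨hmem, ?_⟩, ?_⟩
    · rw [PySem.Str.startswith_eq, PySem.Chars.startswith_iff]
      exact ⟨(PySem.Int.toStr i).toList, by simp [pvFcol, String.toList_append]⟩
    · apply String.toList_inj.mp
      rw [pvSlice_drop,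
        show (pvFcol base i).toList = (base ++ "_").toList ++ (PySem.Int.toStr i).toList from by
          simp [pvFcol, String.toList_append]]
      exact List.drop_left
theorem pvMem_free (existing : List String) (base : String) (c : Int) :
    c ∈ pvFree existing base
      ↔ 2 ≤ c ∧ c < ((pvTk existing base).length : Int) + 3 ∧ pvFcol base c ∉ existing := by
  unfold pvFree
  simp only [List.mem_filter, PySem.List.mem_pyRange_one, Bool.not_eq_eq_eq_not, Bool.not_true,
    PySem.Set.contains, List.contains_eq_mem, decide_eq_false_iff_not, pvMem_tk]
  tauto

theorem pvPigeon (S : List String) (g : Nat → String) (n : Nat)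
    (hinj : ∀ a, a < n → ∀ b, b < n → g a = g b → a = b)
    (hmem : ∀ k, k < n → g k ∈ S) : n ≤ S.length := by
  set L : List String := (List.range n).map g with hL
  have hnd : L.Nodup := by
    refine List.Nodup.map_on ?_ List.nodup_range
    intro a ha b hb hab
    exact hinj a (List.mem_range.mp ha) b (List.mem_range.mp hb) hab
  have hsub : L ⊆ S := by
    intro x hx
    rw [hL, List.mem_map] at hx
    obtain ⟨k, hk, rfl⟩ := hx
    exact hmem k (List.mem_range.mp hk)
  have hle : L.length ≤ S.length := by
    calc L.length = L.toFinset.card := (List.toFinset_card_of_nodup hnd).symm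
      _ ≤ S.toFinset.card := Finset.card_le_card (fun x hx => by
          simp only [List.mem_toFinset] at hx ⊢; exact hsub hx)
      _ ≤ S.length := S.toFinset_card_le
  simpa [hL] using hle

-- pigeonhole: among existing.length + 1 distinct candidates one is free (A's fuel suffices)
theorem pvExistsFree (existing : List String) (base : String) :
    ∃ k : Nat, k < existing.length + 1 ∧ pvFcol base (2 + (k : Int)) ∉ existing := by
  by_contra hc
  push Not at hc
  have hle := pvPigeon existing (fun k => pvFcol base (2 + (k : Int))) (existing.length + 1)
    (fun a _ b _ hab => by
      have := pvFcol_inj base (by omega) (by omega) hab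
      omega)
    (fun k hk => hc k hk)
  omega

-- A's loop returns the least index ≥ start whose column is free
theorem pvALoop_spec (existing : List String) (base : String) :
    ∀ (fuel : Nat) (i : Int), (∃ k : Nat, k < fuel ∧ pvFcol base (i + (k : Int)) ∉ existing) →
      i ≤ pvALoop existing base i fuel ∧ pvFcol base (pvALoop existing base i fuel) ∉ existing ∧
      ∀ j : Int, i ≤ j → j < pvALoop existing base i fuel → pvFcol base j ∈ existing := by
  intro fuel
  induction fuel with
  | zero => rintro i ⟨k, hk, -⟩; omega
  | succ fuel ih =>
    rintro i ⟨k, hk, hfree⟩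
    simp only [pvALoop]
    by_cases h : pvFcol base i ∈ existing
    · rw [if_pos h]
      have hk0 : k ≠ 0 := by
        intro h0
        subst h0
        simp only [Nat.cast_zero, add_zero] at hfree
        exact hfree h
      obtain ⟨k', rfl⟩ := Nat.exists_eq_succ_of_ne_zero hk0
      have hrec := ih (i + 1) ⟨k', by omega, by
        have harg : i + 1 + (k' : Int) = i + ((k' + 1 : Nat) : Int) := by push_cast; ring
        rw [harg]; exact hfree⟩
      refine ⟨by omega, hrec.2.1, ?_⟩
      intro j hj hj2
      rcases eq_or_lt_of_le hj with rfl | hj'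
      · exact h
      · exact hrec.2.2 j (by omega) hj2
    · rw [if_neg h]
      exact ⟨le_refl i, h, fun j hj hj2 => absurd hj (by omega)⟩

-- ===== VERDICT (by name: the statement is the Claim_ definition above) =====
theorem unique_column_name_spec : Claim_equal_unique_column_name := by
  intro existing base _
  unfold Spec_unique_column_name
  by_cases hb : base ∈ existing
  · rw [pvAlt_eq existing base hb]
    unfold unique_column_name
    rw [if_neg (not_not_intro hb)]
    obtain ⟨k, hk, hkfree⟩ := pvExistsFree existing base
    obtain ⟨h2le, hfreeA, hminA⟩ :=
      pvALoop_spec existing base (existing.length + 1) 2 ⟨k, hk, hkfree⟩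
    set iA := pvALoop existing base 2 (existing.length + 1) with hiA
    set N := (pvTk existing base).length with hN
    have hbound : iA ≤ (N : Int) + 2 := by
      by_contra hc
      push Not at hc
      have hle := pvPigeon (pvTk existing base) (fun k => PySem.Int.toStr (2 + (k : Int))) (N + 1)
        (fun a _ b _ hab => by
          have := pvToStr_inj (by omega) (by omega) hab
          omega)
        (fun k hkN => by
          rw [pvMem_tk]
          exact hminA (2 + (k : Int)) (by omega) (by omega))
      omega
    have hiAfree : iA ∈ pvFree existing base := by
      rw [pvMem_free]
      exact ⟨h2le, by omega, hfreeA⟩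
    obtain ⟨m, hm⟩ : ∃ m, PySem.List.min? (pvFree existing base) (fun c => c) = some m := by
      cases hmin : PySem.List.min? (pvFree existing base) (fun c => c) with
      | none =>
        rw [PySem.List.min?_eq_none_iff] at hmin
        rw [hmin] at hiAfree
        simp at hiAfree
      | some m => exact ⟨m, rfl⟩
    rw [hm, Option.getD_some]
    have hmmem := PySem.List.min?_mem hm
    rw [pvMem_free] at hmmem
    have hle1 : m ≤ iA := PySem.List.min?_isMin hm iA hiAfree
    have hge : iA ≤ m := by
      by_contra hc
      push Not at hc
      exact hmmem.2.2 (hminA m hmmem.1 hc)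
    have hmi : m = iA := le_antisymm hle1 hge
    rw [hmi]
  · simp [unique_column_name, unique_column_name_alt, hb]
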